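-- pv_equiv track=rewrite | github.com/MultilingualStaticAnalysis/MLSA | bin/RDAEntryExitList.py | getFV
-- ===== SOURCE A (Python) =====
-- def getFV(killGenList):
-- 	#prettyPrint(killGenList)
--
-- 	FV = []
-- 	subFV1 = ()
-- 	subFV2 = ()
-- 	duplicate  = 0
--
-- 	for index in killGenList:
-- 		duplicate = 0
-- 		scope = index[1]
-- 		#print 'broh', scope
-- 		varID = index[2]['Gen'][0]
-- 		for i in FV:
-- 			if varID == i:
-- 				duplicate = 1
--
-- 		if (duplicate == 0):
-- 			subFV1 = (varID, scope)
-- 			FV.append(subFV1)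
--
--
-- 	FVset = set(FV)
--
-- 	#print FVset
-- 	return FVset
-- ===== SOURCE B (Python) =====
-- def getFV(killGenList):
--     return {(index[2]['Gen'][0], index[1]) for index in killGenList}
-- ===== Notes on version B (the rewrite author's own statement) =====
-- stated objective: faster
-- what changed: B replaces A's list accumulator with its dead O(n) inner dedup scan (comparing a string to tuples, never matching) and the final set() conversion by a single-pass set comprehension that inserts each (varID, scope) pair directly.
import Mathlib
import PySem

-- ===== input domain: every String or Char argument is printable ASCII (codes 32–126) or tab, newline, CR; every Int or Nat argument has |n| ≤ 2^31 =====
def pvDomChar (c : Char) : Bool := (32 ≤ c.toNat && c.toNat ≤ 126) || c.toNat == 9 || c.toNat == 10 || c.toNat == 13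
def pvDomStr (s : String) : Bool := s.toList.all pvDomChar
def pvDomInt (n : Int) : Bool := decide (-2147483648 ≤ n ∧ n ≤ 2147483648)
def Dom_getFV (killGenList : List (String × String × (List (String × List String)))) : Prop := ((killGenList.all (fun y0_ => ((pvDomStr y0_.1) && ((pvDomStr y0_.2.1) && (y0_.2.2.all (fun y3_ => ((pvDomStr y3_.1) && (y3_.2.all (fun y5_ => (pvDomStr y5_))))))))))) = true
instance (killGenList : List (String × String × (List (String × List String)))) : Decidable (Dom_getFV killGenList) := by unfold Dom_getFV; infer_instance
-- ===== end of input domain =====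

-- B builds the set in one pass (set comprehension) instead of A's list accumulator with a dead
-- O(n) inner dedup scan followed by set(); objective: faster (O(n) vs O(n^2)).


-- ===== PORT A =====
-- Literal port of A. Python's inner 'if varID == i' compares a str to a tuple: cross-type '=='
-- is always False in Python, so the fold carries 'duplicate' through unchanged (exact).
-- 'Gen' lookup and [0] are totalized with defaults, used only under Pre_getFV (key present, list nonempty).
def getFV (killGenList : List (String × String × (List (String × List String)))) : List (String × String) :=
  let FV : List (String × String) := killGenList.foldl (fun FV index =>
    let scope := index.2.1
    let varID := PySem.List.pyGetD ((PySem.Dict.mk index.2.2).getD "Gen" []) 0 ""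
    let duplicate : Int := FV.foldl (fun d (_i : String × String) => d) 0
    if duplicate == 0 then FV ++ [(varID, scope)] else FV) []
  PySem.Set.ofList FV

-- ===== PORT B =====
def getFV_alt (killGenList : List (String × String × (List (String × List String)))) : List (String × String) :=
  killGenList.foldl (fun s index =>
    PySem.Set.add s ((PySem.List.pyGetD ((PySem.Dict.mk index.2.2).getD "Gen" []) 0 ""), index.2.1))
    PySem.Set.empty

-- ===== PRECONDITION & SPEC =====
-- Pre_ excludes exactly the inputs where A raises: a triple whose dict lacks key 'Gen'
-- (KeyError) or whose 'Gen' list is empty (IndexError).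
def Pre_getFV (killGenList : List (String × String × (List (String × List String)))) : Prop :=
  ∀ x ∈ killGenList, (PySem.Dict.mk x.2.2).getD "Gen" [] ≠ []
instance (killGenList : List (String × String × (List (String × List String)))) : Decidable (Pre_getFV killGenList) := by unfold Pre_getFV; infer_instance

def pvWitness_getFV : (List (String × String × (List (String × List String)))) :=
  [("a", "s1", [("Gen", ["x"])]), ("b", "s2", [("Gen", ["y", "z"])])]

def Spec_getFV (killGenList : List (String × String × (List (String × List String)))) (out : List (String × String)) : Prop := out = getFV_alt killGenList
instance (killGenList : List (String × String × (List (String × List String)))) (out : List (String × String)) : Decidable (Spec_getFV killGenList out) := by unfold Spec_getFV; infer_instance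

-- ===== CLAIM (what is proved, stated in full; the proofs are below) =====
def Claim_equal_getFV : Prop := ∀ (killGenList : List (String × String × (List (String × List String)))), Dom_getFV killGenList → Pre_getFV killGenList → Spec_getFV killGenList (getFV killGenList)

-- ===== LEMMAS AND PROOFS =====

-- the per-element pair both ports extract
def pvPair (index : String × String × (List (String × List String))) : String × String :=
  (PySem.List.pyGetD ((PySem.Dict.mk index.2.2).getD "Gen" []) 0 "", index.2.1)

-- A's outer fold, with any accumulator, just appends the pairs in order (duplicate is always 0)
theorem pvA_fold (l : List (String × String × (List (String × List String))))
    (acc : List (String × String)) :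
    l.foldl (fun FV index =>
      let scope := index.2.1
      let varID := PySem.List.pyGetD ((PySem.Dict.mk index.2.2).getD "Gen" []) 0 ""
      let duplicate : Int := FV.foldl (fun d (_i : String × String) => d) 0
      if duplicate == 0 then FV ++ [(varID, scope)] else FV) acc
    = acc ++ l.map pvPair := by
  induction l generalizing acc with
  | nil => simp
  | cons x xs ih =>
    have hdup : acc.foldl (fun d (_i : String × String) => d) (0 : Int) = 0 := by
      induction acc <;> simp_all
    simp only [List.foldl_cons, List.map_cons, hdup]
    rw [ih]
    simp [pvPair]

-- B's fold is Set.ofList of the mapped pairs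
theorem pvB_fold (l : List (String × String × (List (String × List String))))
    (s : PySem.Set (String × String)) :
    l.foldl (fun s index =>
      PySem.Set.add s ((PySem.List.pyGetD ((PySem.Dict.mk index.2.2).getD "Gen" []) 0 ""), index.2.1)) s
      = (l.map pvPair).foldl PySem.Set.add s := by
  induction l generalizing s with
  | nil => rfl
  | cons x xs ih => simp [ih, pvPair]

theorem getFV_eq (killGenList : List (String × String × (List (String × List String)))) :
    getFV killGenList = getFV_alt killGenList := by
  show PySem.Set.ofList _ = _
  rw [pvA_fold, getFV_alt, pvB_fold, PySem.Set.ofList_eq_foldl]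
  rfl

-- ===== VERDICT (by name: the statement is the Claim_ definition above) =====
theorem getFV_spec : Claim_equal_getFV := by
  intro kgl _ _
  exact getFV_eq kgl
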